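-- pv_equiv track=rewrite | github.com/jscattergood/review-crew | src/tools/structure_analysis.py | _starts_with_transition
-- ===== SOURCE A (Python) =====
-- def _starts_with_transition(text: str) -> bool:
--     """Check if paragraph starts with transition word/phrase."""
--     transition_starters = [
--         "however",
--         "furthermore",
--         "moreover",
--         "additionally",
--         "meanwhile",
--         "consequently",
--         "therefore",
--         "thus",
--         "nevertheless",
--         "on the other hand",
--         "in contrast",
--         "similarly",
--         "likewise",
--         "for example",
--         "for instance",
--         "first",
--         "second",
--         "third",
--         "finally",
--         "in conclusion",
--         "to summarize",
--     ]
--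
--     text_start = text.lower().strip()
--     return any(text_start.startswith(transition) for transition in transition_starters)
-- ===== SOURCE B (Python) =====
-- def _starts_with_transition(text: str) -> bool:
--     """Check if paragraph starts with transition word/phrase.
--
--     Character-by-character co-scan: instead of testing each phrase with
--     startswith, walk the text once, maintaining the suffixes of the phrases
--     still consistent with the characters seen so far.
--     """
--     transition_starters = [
--         "however",
--         "furthermore",
--         "moreover",
--         "additionally",
--         "meanwhile",
--         "consequently",
--         "therefore",
--         "thus",
--         "nevertheless",
--         "on the other hand",
--         "in contrast",
--         "similarly",
--         "likewise",
--         "for example",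
--         "for instance",
--         "first",
--         "second",
--         "third",
--         "finally",
--         "in conclusion",
--         "to summarize",
--     ]
--
--     candidates = transition_starters
--     for c in text.lower().strip():
--         if not candidates:
--             return False
--         if any(p == "" for p in candidates):
--             return True
--         candidates = [p[1:] for p in candidates if p[0] == c]
--     return any(p == "" for p in candidates)
-- ===== Notes on version B (the rewrite author's own statement) =====
-- stated objective: alternative
-- what changed: Replaced the per-phrase any(startswith) loop by a single left-to-right character scan of the text that incrementally filters the set of still-consistent phrase suffixes (an online multi-pattern co-scan instead of 21 independent prefix tests).
import Mathlib
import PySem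

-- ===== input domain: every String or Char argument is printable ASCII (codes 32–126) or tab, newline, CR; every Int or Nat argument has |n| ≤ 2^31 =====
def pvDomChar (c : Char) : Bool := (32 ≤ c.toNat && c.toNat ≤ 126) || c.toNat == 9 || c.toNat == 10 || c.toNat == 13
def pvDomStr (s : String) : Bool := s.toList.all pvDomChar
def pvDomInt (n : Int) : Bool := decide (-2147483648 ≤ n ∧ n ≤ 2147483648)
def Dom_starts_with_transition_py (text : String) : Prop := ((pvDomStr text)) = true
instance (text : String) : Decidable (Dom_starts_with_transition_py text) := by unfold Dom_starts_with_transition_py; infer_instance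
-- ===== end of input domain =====

-- B replaces the per-phrase startswith loop by a single left-to-right co-scan of the
-- text that incrementally filters the still-matching phrase suffixes (objective: alternative).

-- ===== PORT A =====
-- the literal phrase list of A
def pvTransitionStarters : List String := [
  "however", "furthermore", "moreover", "additionally", "meanwhile",
  "consequently", "therefore", "thus", "nevertheless", "on the other hand",
  "in contrast", "similarly", "likewise", "for example", "for instance",
  "first", "second", "third", "finally", "in conclusion", "to summarize"]

def starts_with_transition_py (text : String) : Bool :=
  let textStart := PySem.Str.strip (PySem.Str.lower text)
  pvTransitionStarters.any (fun transition => PySem.Str.startswith textStart transition)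

-- ===== PORT B =====
-- the same phrase list, held as character lists (B walks them character by character)
def pvAltPhrases : List (List Char) := [
  "however".toList, "furthermore".toList, "moreover".toList, "additionally".toList,
  "meanwhile".toList, "consequently".toList, "therefore".toList, "thus".toList,
  "nevertheless".toList, "on the other hand".toList, "in contrast".toList,
  "similarly".toList, "likewise".toList, "for example".toList, "for instance".toList,
  "first".toList, "second".toList, "third".toList, "finally".toList,
  "in conclusion".toList, "to summarize".toList]

-- the for-loop of Source B: one character at a time, filtering candidate suffixes
def pvAltLoop : List Char → List (List Char) → Bool
  | [], cands => cands.any (fun p => p == [])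
  | c :: rest, cands =>
    if cands = [] then false
    else if cands.any (fun p => p == []) then true
    else pvAltLoop rest ((cands.filter (fun p => p.head? == some c)).map (fun p => p.drop 1))

def starts_with_transition_py_alt (text : String) : Bool :=
  pvAltLoop (PySem.Chars.strip (PySem.Chars.lower text.toList)) pvAltPhrases

-- ===== PRECONDITION & SPEC =====
def Spec_starts_with_transition_py (text : String) (out : Bool) : Prop := out = starts_with_transition_py_alt text
instance (text : String) (out : Bool) : Decidable (Spec_starts_with_transition_py text out) := by unfold Spec_starts_with_transition_py; infer_instance

-- ===== CLAIM (what is proved, stated in full; the proofs are below) =====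
def Claim_equal_starts_with_transition_py : Prop := ∀ (text : String), Dom_starts_with_transition_py text → Spec_starts_with_transition_py text (starts_with_transition_py text)

-- ===== LEMMAS AND PROOFS =====

-- the co-scan computes exactly "some candidate is a prefix of the text"
-- Boolean form of Chars.startswith_iff, used to line the two programs up
theorem pvStartswith_eq_decide (s p : List Char) :
    PySem.Chars.startswith s p = decide (p <+: s) := by
  rw [Bool.eq_iff_iff, PySem.Chars.startswith_iff, decide_eq_true_eq]

-- the co-scan computes exactly "some candidate is a prefix of the text"
theorem pvAltLoop_eq (t : List Char) : ∀ (cs : List (List Char)),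
    pvAltLoop t cs = cs.any (fun p => decide (p <+: t)) := by
  induction t with
  | nil =>
    intro cs
    simp only [pvAltLoop, List.prefix_nil]
    congr 1
    funext p
    cases p <;> simp
  | cons c rest ih =>
    intro cs
    rw [pvAltLoop]
    by_cases hnil : cs = []
    · simp [hnil]
    · rw [if_neg hnil]
      by_cases hemp : cs.any (fun p => p == []) = true
      · rw [if_pos hemp]
        rcases List.any_eq_true.mp hemp with ⟨p, hp, hpe⟩
        have : p = [] := by simpa using hpe
        subst this
        exact (List.any_eq_true.mpr ⟨[], hp, by simp⟩).symm
      · rw [if_neg hemp, ih]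
        rw [List.any_map, List.any_filter, Bool.eq_iff_iff, List.any_eq_true, List.any_eq_true]
        constructor
        · rintro ⟨p, hp, hcond⟩
          have hne : p ≠ [] := by
            intro h; exact hemp (List.any_eq_true.mpr ⟨p, hp, by simp [h]⟩)
          obtain ⟨q, qs, rfl⟩ := List.exists_cons_of_ne_nil hne
          refine ⟨q :: qs, hp, ?_⟩
          simp only [Function.comp, List.head?_cons, List.drop_one, List.tail_cons,
            Bool.and_eq_true, beq_iff_eq, Option.some.injEq, decide_eq_true_eq] at hcond ⊢
          exact List.cons_prefix_cons.mpr ⟨hcond.1, hcond.2⟩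
        · rintro ⟨p, hp, hcond⟩
          have hne : p ≠ [] := by
            intro h; exact hemp (List.any_eq_true.mpr ⟨p, hp, by simp [h]⟩)
          obtain ⟨q, qs, rfl⟩ := List.exists_cons_of_ne_nil hne
          rw [decide_eq_true_eq, List.cons_prefix_cons] at hcond
          refine ⟨q :: qs, hp, ?_⟩
          simp [Function.comp, hcond.1, hcond.2]

-- ===== VERDICT (by name: the statement is the Claim_ definition above) =====
theorem starts_with_transition_py_spec : Claim_equal_starts_with_transition_py := by
  intro text _
  show starts_with_transition_py text = starts_with_transition_py_alt text
  unfold starts_with_transition_py starts_with_transition_py_alt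
  rw [pvAltLoop_eq]
  simp only [PySem.Str.startswith_eq, PySem.Str.toList_strip, PySem.Str.toList_lower,
    pvStartswith_eq_decide, pvTransitionStarters, pvAltPhrases, List.any_cons, List.any_nil]
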